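-- pv_equiv track=rewrite | github.com/ftjahn8/orphan-detection | orphan_detection/core/dynamic_url_detection.py | identify_subdomains
-- ===== SOURCE A (Python) =====
-- from typing import List, Tuple, Dict, Set
--
-- def identify_subdomains(url_list: List[str], domain: str) -> Dict[str, List[str]]:
--     """
--     Identify all subdomains in the candidate urls and group the urls together by their subdomain.
--     :param url_list: list with all urls
--     :param domain: domain to identify orphan pages for
--     :return: mapping of subdomains to their urls
--     """
--     domain_lookup = {}
--     for url in url_list:
--         index_domain_begin = url.find(domain)
--         sub_domain = url[:index_domain_begin + len(domain)]
--         if sub_domain in domain_lookup: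
--             domain_lookup[sub_domain].append(url)
--         else:
--             domain_lookup[sub_domain] = [url]
--     return domain_lookup
-- ===== SOURCE B (Python) =====
-- def identify_subdomains(url_list, domain):
--     """Partition refinement: repeatedly peel off the entire group of the first remaining
--     url, instead of bucketing urls one by one into a dict."""
--     def subdomain(url):
--         return url[:url.find(domain) + len(domain)]
--     groups = {}
--     remaining = url_list
--     while remaining:
--         key = subdomain(remaining[0])
--         groups[key] = [u for u in remaining if subdomain(u) == key]
--         remaining = [u for u in remaining if subdomain(u) != key]
--     return groups
-- ===== Notes on version B (the rewrite author's own statement) =====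
-- stated objective: alternative
-- what changed: Replaced A's single-pass dict bucketing (per-url membership test, append-or-create) with partition refinement: a while loop that each round takes the first remaining url's subdomain key, emits the whole group of urls sharing it in one comprehension, and recurses on the filtered remainder.
import Mathlib
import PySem

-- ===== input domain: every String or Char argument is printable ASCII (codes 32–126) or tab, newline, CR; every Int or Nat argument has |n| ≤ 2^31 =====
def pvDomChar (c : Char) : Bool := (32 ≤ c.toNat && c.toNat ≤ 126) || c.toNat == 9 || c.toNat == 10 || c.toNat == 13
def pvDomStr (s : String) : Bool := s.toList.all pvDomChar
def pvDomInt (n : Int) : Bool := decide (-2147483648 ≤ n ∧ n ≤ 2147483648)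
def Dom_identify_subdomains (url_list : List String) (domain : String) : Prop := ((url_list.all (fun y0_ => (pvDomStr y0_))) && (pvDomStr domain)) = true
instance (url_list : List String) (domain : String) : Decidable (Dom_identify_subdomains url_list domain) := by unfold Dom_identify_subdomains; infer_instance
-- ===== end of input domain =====

-- B groups urls by subdomain via partition refinement (each round peels the whole group of the
-- first remaining url) instead of A's per-url incremental dict-bucketing; objective: alternative.


-- shared key expression: url[:url.find(domain) + len(domain)] (both Pythons compute exactly this)
def pvSubKey (domain url : String) : String :=
  PySem.Str.slice url none (some (PySem.Str.find url domain + PySem.Str.len domain))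

-- ===== PORT A =====
-- one iteration of A's loop body
def pvStepA (domain : String) (d : PySem.Dict String (List String)) (url : String) :
    PySem.Dict String (List String) :=
  let sub_domain := pvSubKey domain url
  if d.contains sub_domain then d.insert sub_domain (d.getD sub_domain [] ++ [url])
  else d.insert sub_domain [url]

def identify_subdomains (url_list : List String) (domain : String) : List (String × List String) :=
  (url_list.foldl (pvStepA domain) PySem.Dict.empty).items

-- ===== PORT B =====
-- B's while-loop: peel off the group of the first remaining url, recurse on the rest.
-- Each round's key is FRESH (the rest keeps no url with an already-peeled key), so
-- 'groups[key] = …' always appends a new entry: the dict's items are exactly the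
-- produced (key, group) pairs in production order, ported as the cons below.
def pvLoopB (domain : String) (remaining : List String) : List (String × List String) :=
  match remaining with
  | [] => []
  | u :: t =>
    let key := pvSubKey domain u
    (key, (u :: t).filter (fun v => pvSubKey domain v == key)) ::
      pvLoopB domain ((u :: t).filter (fun v => !(pvSubKey domain v == key)))
termination_by remaining.length
decreasing_by
  simp only [List.filter_cons, beq_self_eq_true, Bool.not_true, List.length_cons]
  exact Nat.lt_succ_of_le (List.length_filter_le _ t)

def identify_subdomains_alt (url_list : List String) (domain : String) : List (String × List String) :=
  pvLoopB domain url_list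

-- ===== PRECONDITION & SPEC =====
def Spec_identify_subdomains (url_list : List String) (domain : String) (out : List (String × List String)) : Prop := out = identify_subdomains_alt url_list domain
instance (url_list : List String) (domain : String) (out : List (String × List String)) : Decidable (Spec_identify_subdomains url_list domain out) := by unfold Spec_identify_subdomains; infer_instance

-- ===== CLAIM (what is proved, stated in full; the proofs are below) =====
def Claim_equal_identify_subdomains : Prop := ∀ (url_list : List String) (domain : String), Dom_identify_subdomains url_list domain → Spec_identify_subdomains url_list domain (identify_subdomains url_list domain)

-- ===== LEMMAS AND PROOFS =====
lemma pv_dedup_append_mem {α : Type} [BEq α] [LawfulBEq α] (l : List α) (a : α) (h : a ∈ l) :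
    PySem.List.dedup (l ++ [a]) = PySem.List.dedup l := by
  simp [PySem.List.dedup, PySem.Set.ofList, List.foldl_append, PySem.Set.add]
  exact (PySem.Set.mem_ofList l a).2 h

lemma pv_dedup_append_not_mem {α : Type} [BEq α] [LawfulBEq α] (l : List α) (a : α) (h : a ∉ l) :
    PySem.List.dedup (l ++ [a]) = PySem.List.dedup l ++ [a] := by
  simp [PySem.List.dedup, PySem.Set.ofList, List.foldl_append, PySem.Set.add]
  intro hc
  exact absurd ((PySem.Set.mem_ofList l a).1 hc) h

lemma pv_find?_map_of_nodup {α β : Type} [BEq α] [LawfulBEq α] (ks : List α) (g : α → β) (k : α)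
    (hn : ks.Nodup) (hm : k ∈ ks) :
    List.find? (fun p => p.1 == k) (ks.map (fun j => (j, g j))) = some (k, g k) := by
  induction ks with
  | nil => cases hm
  | cons x t ih =>
    by_cases hx : x = k
    · subst hx; simp
    · simp only [List.map_cons, List.find?_cons]
      rw [beq_eq_false_iff_ne.2 hx]
      exact ih (List.Nodup.of_cons hn) (by cases hm with | head => exact absurd rfl hx | tail _ h => exact h)

-- characterisation of A's loop: items = distinct keys in first-occurrence order, each with its filter
lemma pv_group_loop (f : String → String) (xs : List String) :
    (xs.foldl (fun d u => if d.contains (f u) then d.insert (f u) (d.getD (f u) [] ++ [u])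
                          else d.insert (f u) [u]) PySem.Dict.empty).items
      = (PySem.List.dedup (xs.map f)).map (fun k => (k, xs.filter (fun u => f u == k))) := by
  induction xs using List.reverseRecOn with
  | nil => simp [PySem.Dict.empty, PySem.List.dedup, PySem.Set.ofList, PySem.Set.empty]
  | append_singleton xs x ih =>
    rw [List.foldl_append]
    have hd : (xs.foldl (fun d u => if d.contains (f u) then d.insert (f u) (d.getD (f u) [] ++ [u])
                          else d.insert (f u) [u]) PySem.Dict.empty)
        = PySem.Dict.mk ((PySem.List.dedup (xs.map f)).map (fun k => (k, xs.filter (fun u => f u == k)))) := by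
      apply PySem.Dict.ext; exact ih
    rw [hd]
    simp only [List.foldl_cons, List.foldl_nil, List.map_append, List.map_cons, List.map_nil]
    by_cases hmem : f x ∈ xs.map f
    · have hcont : (PySem.Dict.mk ((PySem.List.dedup (xs.map f)).map (fun k => (k, xs.filter (fun u => f u == k))))).contains (f x) = true := by
        simp only [PySem.Dict.contains, List.any_eq_true]
        exact ⟨(f x, xs.filter (fun u => f u == f x)),
          List.mem_map_of_mem ((PySem.List.mem_dedup _ _).2 hmem), by simp⟩
      have hget : (PySem.Dict.mk ((PySem.List.dedup (xs.map f)).map (fun k => (k, xs.filter (fun u => f u == k))))).getD (f x) []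
          = xs.filter (fun u => f u == f x) := by
        simp only [PySem.Dict.getD, PySem.Dict.get?]
        rw [pv_find?_map_of_nodup _ _ _ (PySem.List.nodup_dedup _) ((PySem.List.mem_dedup _ _).2 hmem)]
        rfl
      rw [hcont, if_pos rfl, hget]
      simp only [PySem.Dict.insert]
      rw [if_pos hcont]
      rw [pv_dedup_append_mem _ _ hmem]
      simp only [List.map_map]
      apply List.map_congr_left
      intro k hk
      by_cases hkx : k = f x
      · subst hkx
        simp [List.filter_append]
      · simp [Function.comp, beq_eq_false_iff_ne.2 hkx, List.filter_append,
              beq_eq_false_iff_ne.2 (fun h => hkx h.symm)]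
    · have hcont : (PySem.Dict.mk ((PySem.List.dedup (xs.map f)).map (fun k => (k, xs.filter (fun u => f u == k))))).contains (f x) = false := by
        simp only [PySem.Dict.contains, List.any_eq_false]
        intro p hp
        obtain ⟨k, hk, rfl⟩ := List.mem_map.1 hp
        intro hEq
        exact hmem (eq_of_beq hEq ▸ (PySem.List.mem_dedup _ _).1 hk)
      rw [hcont]
      simp only [Bool.false_eq_true, if_false, PySem.Dict.insert, hcont]
      rw [pv_dedup_append_not_mem _ _ hmem, List.map_append, List.map_cons, List.map_nil]
      have hfilt : List.filter (fun u => f u == f x) xs = [] := by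
        rw [List.filter_eq_nil_iff]
        intro u hu h
        exact hmem (eq_of_beq h ▸ List.mem_map_of_mem hu)
      congr 1
      · apply List.map_congr_left
        intro k hk
        have hkx : f x ≠ k := fun h => hmem (h ▸ (PySem.List.mem_dedup _ _).1 hk)
        simp [List.filter_append, beq_eq_false_iff_ne.2 hkx]
      · simp [List.filter_append, hfilt]

-- discarding x from set(l) is set(l with x's occurrences removed)
lemma pv_discard_ofList {α : Type} [BEq α] [LawfulBEq α] (l : List α) (x : α) :
    (PySem.Set.ofList l).discard x = PySem.Set.ofList (l.filter (fun y => !(y == x))) := by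
  induction l using List.reverseRecOn with
  | nil => rfl
  | append_singleton l a ih =>
    rw [PySem.Set.ofList_append_singleton]
    by_cases hax : a = x
    · subst hax
      have h1 : List.filter (fun y => !(y == a)) (l ++ [a]) = List.filter (fun y => !(y == a)) l := by
        simp [List.filter_append]
      rw [h1, ← ih]
      by_cases hm : a ∈ PySem.Set.ofList l
      · rw [PySem.Set.add_of_mem hm]
      · rw [PySem.Set.add_of_not_mem hm]
        simp [PySem.Set.discard, List.filter_append]
    · have h1 : List.filter (fun y => !(y == x)) (l ++ [a]) = List.filter (fun y => !(y == x)) l ++ [a] := by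
        simp [List.filter_append, beq_eq_false_iff_ne.2 hax]
      rw [h1]
      by_cases hm : a ∈ PySem.Set.ofList l
      · rw [PySem.Set.add_of_mem hm, ih, PySem.Set.ofList_append_singleton, PySem.Set.add_of_mem]
        rw [PySem.Set.mem_ofList] at hm ⊢
        exact List.mem_filter.2 ⟨hm, by simp [beq_eq_false_iff_ne.2 hax]⟩
      · rw [PySem.Set.add_of_not_mem hm]
        have h2 : (PySem.Set.ofList l ++ [a]).discard x = (PySem.Set.ofList l).discard x ++ [a] := by
          simp [PySem.Set.discard, List.filter_append, beq_eq_false_iff_ne.2 hax]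
        rw [h2, ih, PySem.Set.ofList_append_singleton, PySem.Set.add_of_not_mem]
        rw [PySem.Set.mem_ofList] at hm ⊢
        exact fun hc => hm (List.mem_filter.1 hc).1

lemma pv_dedup_cons_filter {α : Type} [BEq α] [LawfulBEq α] (x : α) (l : List α) :
    PySem.List.dedup (x :: l) = x :: PySem.List.dedup (l.filter (fun y => !(y == x))) := by
  simp only [PySem.List.dedup, PySem.Set.ofList_cons, pv_discard_ofList]

-- B's partition-refinement loop produces the same first-occurrence-keyed groups
lemma pv_loopB_eq (domain : String) (n : Nat) : ∀ (xs : List String), xs.length ≤ n →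
    pvLoopB domain xs = (PySem.List.dedup (xs.map (pvSubKey domain))).map
      (fun k => (k, xs.filter (fun u => pvSubKey domain u == k))) := by
  induction n with
  | zero =>
    intro xs hxs
    have : xs = [] := List.length_eq_zero_iff.1 (Nat.le_zero.1 hxs)
    subst this
    simp [pvLoopB, PySem.List.dedup, PySem.Set.ofList, PySem.Set.empty]
  | succ n ih =>
    intro xs hxs
    match xs with
    | [] => simp [pvLoopB, PySem.List.dedup, PySem.Set.ofList, PySem.Set.empty]
    | u :: t =>
      set f := pvSubKey domain with hfdef
      rw [pvLoopB]
      have hrest : (u :: t).filter (fun v => !(f v == f u)) = t.filter (fun v => !(f v == f u)) := by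
        simp
      have hrec := ih (t.filter (fun v => !(f v == f u)))
        (le_trans (List.length_filter_le _ t) (Nat.le_of_succ_le_succ hxs))
      rw [hrest, hrec, List.map_cons, pv_dedup_cons_filter]
      have hmapfilt : (t.map f).filter (fun y => !(y == f u)) = (t.filter (fun v => !(f v == f u))).map f := by
        rw [List.filter_map]; rfl
      rw [List.map_cons, hmapfilt]
      refine congrArg₂ List.cons rfl ?_
      apply List.map_congr_left
      intro k hk
      have hkne : k ≠ f u := by
        intro hceq
        have hmm : k ∈ (t.filter (fun v => !(f v == f u))).map f := (PySem.List.mem_dedup _ _).1 hk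
        obtain ⟨v, hv, rfl⟩ := List.mem_map.1 hmm
        have hcc := (List.mem_filter.1 hv).2
        rw [hceq] at hcc
        simp at hcc
      have hufail : (f u == k) = false := beq_eq_false_iff_ne.2 (fun h => hkne h.symm)
      have hfil1 : (u :: t).filter (fun w => f w == k) = t.filter (fun w => f w == k) := by
        rw [List.filter_cons, hufail]
        simp
      have hfil2 : (t.filter (fun v => !(f v == f u))).filter (fun w => f w == k)
          = t.filter (fun w => f w == k) := by
        rw [List.filter_filter]
        apply List.filter_congr
        intro v _
        by_cases hv : f v = k
        · simp [hv, beq_eq_false_iff_ne.2 hkne]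
        · simp [beq_eq_false_iff_ne.2 hv]
      rw [hfil1, hfil2]

-- ===== VERDICT (by name: the statement is the Claim_ definition above) =====
theorem identify_subdomains_spec : Claim_equal_identify_subdomains := by
  intro url_list domain _
  unfold Spec_identify_subdomains identify_subdomains identify_subdomains_alt pvStepA
  rw [pv_group_loop (pvSubKey domain) url_list, pv_loopB_eq domain url_list.length url_list (le_refl _)]
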